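/- GENERATED by mk_final_copies.py from the proof of the farm's unit `start_decoder.9` (farm:start_decoder.9.2: Proof.lean) as the
   re-elaboration sweep compiled it — do not edit. -/
import Asan.CheckWalk
import Vorbis.Spec.Units.start_decoder_9
import Vorbis.Spec.Worked.start_decoder_9_Lemmas

/-!
  Unit `start_decoder.9` (segment 9 of start_decoder, 0x114184 … 0x11428b): the proof is the chain of seven sub-segments joined at the
  cut assertions `Body9At` and `Mid79` (work/Lemmas.lean: `seg9a` `seg9b` `seg9c` `seg9d` `seg9e_fail` `seg9e1` `seg9e2`; here: the loop
  `seg9c_all` by induction over `seg9c`, and the chain).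
-/

open X86 X86.User Asan Vorbis Vorbis.Spec Vorbis.Spec.StartDecoder

set_option maxRecDepth 4000
set_option maxHeartbeats 4000000

namespace Vorbis.Spec.start_decoder_9

/-- **Loop 3737 as a whole** (`for (i = 0; i < 6; ++i) header[i] = get8_packet(f);` and the call of `vorbis_validate` behind it): from
the loop head `cut76` with `r13 = i ≤ 6` to `cut77`, by induction on a bound `k` of the measure `6 - i`, one round (`seg9c`) per step. -/
theorem seg9c_all (Lay : Layout) (hLay : Lay.hi = 0x1000000) (μ : Microarch) (hμ : UserX.MicroOK μ) (u₀ : State)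
    (hcode : HasCodeNat Lay u₀ Vorbis.L.start_decoder.entry Vorbis.Code.code_start_decoder.nat Vorbis.L.start_decoder.size)
    (h_g8 : ∀ (others : List Obj) (frames : List (Nat × FrameLayout)) (Blk : Block → Prop) (len : Nat),
      Calls Lay μ Vorbis.WayInv (Vorbis.conv u₀) Vorbis.L.get8_packet.entry (Vorbis.Spec.get8_packet.spec others frames Blk len))
    (h_st1 : Asan.SmallCheck Lay μ Vorbis.WayInv (Vorbis.CodeOK u₀) [.rax, .rdx] 1 Vorbis.L.__asan_store1_noabort.entry)
    (h_vv : ∀ (others : List Obj) (frames : List (Nat × FrameLayout)),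
      Calls Lay μ Vorbis.WayInv (Vorbis.conv u₀) Vorbis.L.vorbis_validate.entry (Vorbis.Spec.vorbis_validate.spec others frames))
    (g : Ghost) :
    ∀ (k : Nat) (A : Arena × List Obj) (v : State) (i : Nat), 6 - i ≤ k →
      Body9At u₀ g Vorbis.L.start_decoder.cut76 A v → i ≤ 6 → v.reg .r13 = UInt64.ofNat i →
      ReachVia Lay μ WayInv v (fun w => ∃ A, Body9At u₀ g Vorbis.L.start_decoder.cut77 A w) := by
  intro k
  induction k with
  | zero =>
    intro A v i hk hb hi hr
    refine (seg9c Lay hLay μ hμ u₀ hcode h_g8 h_st1 h_vv g A v i hb hi hr).trans ?_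
    intro w hw
    rcases hw with ⟨A', j, _, _, _, hlt⟩ | hex
    · omega
    · exact ReachVia.done hex
  | succ k ih =>
    intro A v i hk hb hi hr
    refine (seg9c Lay hLay μ hμ u₀ hcode h_g8 h_st1 h_vv g A v i hb hi hr).trans ?_
    intro w hw
    rcases hw with ⟨A', j, hb', hj, hr', hlt⟩ | hex
    · exact ih A' w j (by omega) hb' hj hr'
    · exact ReachVia.done hex

end Vorbis.Spec.start_decoder_9

/-- **Segment `start_decoder.9`** (0x114184 … 0x11428b: the third packet start, crc32_init, packet type 5, loop 3737, `codebook_count`,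
the codebooks block, its memset): the chain of its parts `seg9a` … `seg9e2` (work/Lemmas.lean and above), joined at the cut
assertions `Body9At` and `Mid79` by `ReachVia.trans`; every error exit is the epilogue's assertion `AtERR`. -/
theorem Vorbis.Spec.Worked.start_decoder_9_ok : Vorbis.Spec.start_decoder_9.Statement := by
  intro Lay hLay μ hμ u₀ hcode h_sp h_crc h_g8 h_err h_st1 h_vv h_gb h_st4 h_sm h_st8 h_ld4 h_ms g v hat
  -- 0x114184 … 0x114199: start_packet, crc32_init
  refine (Vorbis.Spec.start_decoder_9.seg9a Lay hLay μ hμ u₀ hcode h_sp h_crc g v hat).trans ?_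
  intro w1 h1
  rcases h1 with ⟨A1, hb1⟩ | herr
  rotate_left
  · exact ReachVia.done (Or.inr herr)
  -- 0x114199 … 0x1141f7: the packet type
  refine (Vorbis.Spec.start_decoder_9.seg9b Lay hLay μ hμ u₀ hcode h_g8 h_err g A1 w1 hb1).trans ?_
  intro w2 h2
  rcases h2 with ⟨A2, hb2, hr2⟩ | herr
  rotate_left
  · exact ReachVia.done (Or.inr herr)
  -- loop 3737 and vorbis_validate
  have hr2' : w2.reg .r13 = UInt64.ofNat 0 := hr2
  refine (Vorbis.Spec.start_decoder_9.seg9c_all Lay hLay μ hμ u₀ hcode h_g8 h_st1 h_vv g 6 A2 w2 0 (by omega) hb2 (by omega) hr2').trans ?_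
  intro w3 h3
  obtain ⟨A3, hb3⟩ := h3
  -- 0x11420a … 0x11421f: the test of vorbis_validate, get_bits(f, 8)
  refine (Vorbis.Spec.start_decoder_9.seg9d Lay hLay μ hμ u₀ hcode h_err h_gb g A3 w3 hb3).trans ?_
  intro w4 h4
  rcases h4 with ⟨A4, hb4, hlt4⟩ | herr
  rotate_left
  · exact ReachVia.done (Or.inr herr)
  -- 0x11421f … 0x11428b: codebook_count, the codebooks block, the memset
  have hrax4 : w4.reg .rax = UInt64.ofNat (w4.reg .rax).toNat := (UInt64.ofNat_toNat).symm
  by_cases hfit : A4.1.Fits (2120 * ((w4.reg .rax).toNat + 1))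
  · -- the request fits: 0x11421f … 0x114245 (setup_malloc returned the block), then 0x114245 … 0x11428b (memset)
    refine (Vorbis.Spec.start_decoder_9.seg9e1 Lay hLay μ hμ u₀ hcode h_st4 h_sm g A4 w4 (w4.reg .rax).toNat hb4 hlt4 hrax4
      _ rfl hfit).trans ?_
    intro w5 h5
    exact Vorbis.Spec.start_decoder_9.seg9e2 Lay hLay μ hμ u₀ hcode h_st8 h_ld4 h_ms g A4 w4 w5 (w4.reg .rax).toNat hb4 hlt4
      _ rfl hfit h5
  · -- the request does not fit: NULL stored, `error(f, 3)`, the epilogue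
    exact Vorbis.Spec.start_decoder_9.seg9e_fail Lay hLay μ hμ u₀ hcode h_err h_st4 h_sm h_st8 h_ld4 h_ms g A4 w4
      (w4.reg .rax).toNat hb4 hlt4 hrax4 hfit
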